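-- pv_equiv track=rewrite | github.com/LunarStrain94/Zavrsni_rad-Nikola_Bosnjak | CheckCandidates.py | candidateFlushOnTable
-- ===== SOURCE A (Python) =====
-- CARD_CLR = 0
--
-- CARD_NMBR = 1
--
-- def candidateFlushOnTable(candidates):
--     length = len(candidates)
--     if length > 4:
--         return False
--     for i in range(0, length):
--         if candidates[i][CARD_CLR] == "W":
--             continue
--         for j in range(0, length):
--             if i == j:
--                 continue
--             if candidates[j][CARD_CLR] == "W":
--                 continue
--             if candidates[i][CARD_NMBR] != candidates[j][CARD_NMBR]:
--                 return False
--             if candidates[i][CARD_CLR] == candidates[j][CARD_CLR]: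
--                 return False
--     return True
-- ===== SOURCE B (Python) =====
-- CARD_CLR = 0
--
-- CARD_NMBR = 1
--
-- def candidateFlushOnTable(candidates):
--     if len(candidates) > 4:
--         return False
--     nw = [c for c in candidates if c[CARD_CLR] != "W"]
--     return len({c[CARD_NMBR] for c in nw}) <= 1 and len({c[CARD_CLR] for c in nw}) == len(nw)
-- ===== Notes on version B (the rewrite author's own statement) =====
-- stated objective: simpler
-- what changed: Replaces the nested O(n^2) pairwise index loops with a single filter pass plus two set cardinality checks: non-wild cards form a flush iff their numbers are all equal and their colors are all distinct.
import Mathlib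
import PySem

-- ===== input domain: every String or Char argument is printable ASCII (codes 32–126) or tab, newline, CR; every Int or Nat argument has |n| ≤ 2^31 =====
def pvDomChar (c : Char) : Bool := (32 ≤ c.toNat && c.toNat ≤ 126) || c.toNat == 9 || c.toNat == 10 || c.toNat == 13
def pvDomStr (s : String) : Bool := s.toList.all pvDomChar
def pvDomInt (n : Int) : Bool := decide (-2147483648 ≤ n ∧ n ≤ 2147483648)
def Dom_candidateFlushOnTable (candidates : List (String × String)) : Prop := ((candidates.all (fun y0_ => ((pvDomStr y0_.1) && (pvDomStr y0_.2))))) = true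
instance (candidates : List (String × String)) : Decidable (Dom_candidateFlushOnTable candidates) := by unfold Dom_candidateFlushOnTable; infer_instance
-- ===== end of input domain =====

-- B replaces A's nested pairwise index loops by one filter pass and two set-cardinality
-- checks (all numbers equal, all colors distinct among non-wild cards); objective: simpler.

-- ===== PORT A =====
-- a card is a pair (color, number): c.1 = c[CARD_CLR], c.2 = c[CARD_NMBR]
def candidateFlushOnTable (candidates : List (String × String)) : Bool :=
  let length : Int := candidates.length
  if length > 4 then false
  else
    -- indices come from range(0, length), so candidates[i] never raises; pyGetD is exact here
    (PySem.List.pyRange 0 length 1).all (fun i =>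
      let ci := PySem.List.pyGetD candidates i ("", "")
      if ci.1 == "W" then true
      else
        (PySem.List.pyRange 0 length 1).all (fun j =>
          if i == j then true
          else
            let cj := PySem.List.pyGetD candidates j ("", "")
            if cj.1 == "W" then true
            else if ci.2 != cj.2 then false
            else if ci.1 == cj.1 then false
            else true))

-- ===== PORT B =====
def candidateFlushOnTable_alt (candidates : List (String × String)) : Bool :=
  if candidates.length > 4 then false
  else
    let nw := candidates.filter (fun c => c.1 != "W")
    decide ((PySem.Set.ofList (nw.map (fun c => c.2))).length ≤ 1) &&
      ((PySem.Set.ofList (nw.map (fun c => c.1))).length == nw.length)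

-- ===== PRECONDITION & SPEC =====
def Spec_candidateFlushOnTable (candidates : List (String × String)) (out : Bool) : Prop := out = candidateFlushOnTable_alt candidates
instance (candidates : List (String × String)) (out : Bool) : Decidable (Spec_candidateFlushOnTable candidates out) := by unfold Spec_candidateFlushOnTable; infer_instance

-- ===== CLAIM (what is proved, stated in full; the proofs are below) =====
def Claim_equal_candidateFlushOnTable : Prop := ∀ (candidates : List (String × String)), Dom_candidateFlushOnTable candidates → Spec_candidateFlushOnTable candidates (candidateFlushOnTable candidates)

-- ===== LEMMAS AND PROOFS =====

-- the symmetric "flush-compatible" relation both programs test on pairs of cards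
def pvR (a b : String × String) : Prop :=
  a.1 ≠ "W" → b.1 ≠ "W" → (a.2 = b.2 ∧ a.1 ≠ b.1)

theorem pvR_symm : Symmetric pvR := by
  intro a b h hb ha
  exact ⟨(h ha hb).1.symm, Ne.symm (h ha hb).2⟩

-- PySem.Set.ofList xs is a sublist of xs
theorem pvOfList_loop_sublist {α : Type} [BEq α] (xs acc : List α) :
    (List.foldl PySem.Set.add acc xs).Sublist (acc ++ xs) := by
  induction xs generalizing acc with
  | nil => simp
  | cons x xs ih =>
      have h1 := ih (PySem.Set.add acc x)
      have h2 : (PySem.Set.add acc x ++ xs).Sublist (acc ++ x :: xs) := by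
        unfold PySem.Set.add
        split
        · exact List.Sublist.append (List.Sublist.refl acc) (List.sublist_cons_self x xs)
        · rw [List.append_assoc]
          exact List.Sublist.refl _
      exact List.Sublist.trans h1 h2

theorem pvOfList_sublist {α : Type} [BEq α] (xs : List α) :
    (PySem.Set.ofList xs).Sublist xs := by
  simpa using pvOfList_loop_sublist xs []

-- |set(xs)| = |xs| ↔ xs has no duplicates
theorem pvOfList_length_eq_iff {α : Type} [BEq α] [LawfulBEq α] (xs : List α) :
    (PySem.Set.ofList xs).length = xs.length ↔ xs.Nodup := by
  constructor
  · intro h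
    have := (pvOfList_sublist xs).eq_of_length h
    exact this ▸ PySem.Set.nodup_ofList xs
  · intro h
    have hsub : xs ⊆ PySem.Set.ofList xs := fun a ha => (PySem.Set.mem_ofList xs a).mpr ha
    have h1 : xs.length ≤ (PySem.Set.ofList xs).length :=
      (List.subperm_of_subset h hsub).length_le
    exact Nat.le_antisymm ((pvOfList_sublist xs).length_le) h1

-- |set(xs)| ≤ 1 ↔ all elements of xs are equal
theorem pvOfList_length_le_one_iff {α : Type} [BEq α] [LawfulBEq α] (xs : List α) :
    (PySem.Set.ofList xs).length ≤ 1 ↔ ∀ a ∈ xs, ∀ b ∈ xs, a = b := by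
  constructor
  · intro h a ha b hb
    have ha' := (PySem.Set.mem_ofList xs a).mpr ha
    have hb' := (PySem.Set.mem_ofList xs b).mpr hb
    rcases hs : PySem.Set.ofList xs with _ | ⟨x, _ | ⟨y, t⟩⟩
    · rw [hs] at ha'; simp at ha'
    · rw [hs] at ha' hb'
      simp at ha' hb'
      rw [ha', hb']
    · rw [hs] at h; simp at h
  · intro h
    rcases hs : PySem.Set.ofList xs with _ | ⟨x, _ | ⟨y, t⟩⟩
    · simp
    · simp
    · exfalso
      have hnd := PySem.Set.nodup_ofList xs
      rw [hs] at hnd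
      have hx : x ∈ xs := (PySem.Set.mem_ofList xs x).mp (hs ▸ List.mem_cons_self)
      have hy : y ∈ xs := (PySem.Set.mem_ofList xs y).mp
        (hs ▸ List.mem_cons_of_mem x List.mem_cons_self)
      have : x = y := h x hx y hy
      simp [this] at hnd

-- A's double loop (the part after the length guard) tests exactly Pairwise pvR
theorem pvA_loop_iff (cs : List (String × String)) :
    ((PySem.List.pyRange 0 (cs.length : Int) 1).all (fun i =>
      let ci := PySem.List.pyGetD cs i ("", "")
      if ci.1 == "W" then true
      else
        (PySem.List.pyRange 0 (cs.length : Int) 1).all (fun j =>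
          if i == j then true
          else
            let cj := PySem.List.pyGetD cs j ("", "")
            if cj.1 == "W" then true
            else if ci.2 != cj.2 then false
            else if ci.1 == cj.1 then false
            else true)) = true) ↔ cs.Pairwise pvR := by
  rw [List.pairwise_iff_getElem]
  simp only [List.all_eq_true, PySem.List.mem_pyRange_one]
  constructor
  · intro h i j hi hj hij hwi hwj
    have h1 := h (i : Int) (by omega)
    rw [PySem.List.pyGetD_natCast, List.getD_eq_getElem _ _ hi] at h1
    simp only [beq_iff_eq] at h1
    rw [if_neg hwi] at h1
    simp only [List.all_eq_true, PySem.List.mem_pyRange_one] at h1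
    have h2 := h1 (j : Int) (by omega)
    have hne : ¬ ((i : Int) = (j : Int)) := by omega
    simp only [if_neg hne] at h2
    rw [PySem.List.pyGetD_natCast, List.getD_eq_getElem _ _ hj] at h2
    simp only [bne_iff_ne, ne_eq] at h2
    rw [if_neg hwj] at h2
    by_cases he : cs[i].2 = cs[j].2
    · refine ⟨he, ?_⟩
      intro hc
      rw [if_neg (by simp [he]), if_pos hc] at h2
      exact Bool.false_ne_true h2
    · rw [if_pos he] at h2
      exact absurd h2 Bool.false_ne_true
  · intro h i hi
    have hilt : i.toNat < cs.length := by omega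
    rw [PySem.List.pyGetD_of_nonneg cs _ hi.1, List.getD_eq_getElem _ _ hilt]
    simp only [beq_iff_eq]
    by_cases hwi : cs[i.toNat].1 = "W"
    · rw [if_pos hwi]
    · rw [if_neg hwi]
      simp only [List.all_eq_true, PySem.List.mem_pyRange_one]
      intro j hj
      have hjlt : j.toNat < cs.length := by omega
      by_cases hij : i = j
      · simp [hij]
      · rw [if_neg (by simpa using hij)]
        rw [PySem.List.pyGetD_of_nonneg cs _ hj.1, List.getD_eq_getElem _ _ hjlt]
        simp only [bne_iff_ne, ne_eq]
        by_cases hwj : cs[j.toNat].1 = "W"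
        · rw [if_pos hwj]
        · rw [if_neg hwj]
          have hR : pvR cs[i.toNat] cs[j.toNat] := by
            rcases Nat.lt_or_ge i.toNat j.toNat with hlt | hge
            · exact h i.toNat j.toNat hilt hjlt hlt
            · have hlt : j.toNat < i.toNat := by omega
              exact pvR_symm (h j.toNat i.toNat hjlt hilt hlt)
          obtain ⟨he, hc⟩ := hR hwi hwj
          rw [if_neg (by simp [he]), if_neg hc]

-- B's set conditions (the part after the length guard) test exactly Pairwise pvR
theorem pvB_iff (cs : List (String × String)) :
    ((decide ((PySem.Set.ofList ((cs.filter (fun c => c.1 != "W")).map (fun c => c.2))).length ≤ 1) &&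
      ((PySem.Set.ofList ((cs.filter (fun c => c.1 != "W")).map (fun c => c.1))).length ==
        (cs.filter (fun c => c.1 != "W")).length)) = true) ↔ cs.Pairwise pvR := by
  rw [Bool.and_eq_true, decide_eq_true_iff, beq_iff_eq, pvOfList_length_le_one_iff,
      show (cs.filter (fun c => c.1 != "W")).length
        = ((cs.filter (fun c => c.1 != "W")).map (fun c => c.1)).length from
        (List.length_map _).symm,
      pvOfList_length_eq_iff]
  constructor
  · intro ⟨hnum, hclr⟩
    have hclr' : (cs.filter (fun c => c.1 != "W")).Pairwise (fun a b => a.1 ≠ b.1) :=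
      List.pairwise_map.mp hclr
    rw [List.pairwise_filter] at hclr'
    refine List.Pairwise.imp_of_mem ?_ hclr'
    intro a b ha hb hne hwa hwb
    refine ⟨?_, hne (by simpa using hwa) (by simpa using hwb)⟩
    have hma : a.2 ∈ (cs.filter (fun c => c.1 != "W")).map (fun c => c.2) :=
      List.mem_map_of_mem (List.mem_filter.mpr ⟨ha, by simpa using hwa⟩)
    have hmb : b.2 ∈ (cs.filter (fun c => c.1 != "W")).map (fun c => c.2) :=
      List.mem_map_of_mem (List.mem_filter.mpr ⟨hb, by simpa using hwb⟩)
    exact hnum _ hma _ hmb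
  · intro h
    constructor
    · intro a ha b hb
      obtain ⟨a', ha', rfl⟩ := List.mem_map.mp ha
      obtain ⟨b', hb', rfl⟩ := List.mem_map.mp hb
      have hfa := List.mem_filter.mp ha'
      have hfb := List.mem_filter.mp hb'
      by_cases hab : a' = b'
      · rw [hab]
      · have : ∀ x ∈ cs, ∀ y ∈ cs, x ≠ y → pvR x y := h.forall pvR_symm
        exact (this a' hfa.1 b' hfb.1 hab (by simpa using hfa.2) (by simpa using hfb.2)).1
    · unfold List.Nodup
      rw [List.pairwise_map, List.pairwise_filter]
      refine List.Pairwise.imp_of_mem ?_ h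
      intro a b _ _ hR hwa hwb
      exact (hR (by simpa using hwa) (by simpa using hwb)).2

-- ===== VERDICT (by name: the statement is the Claim_ definition above) =====
theorem candidateFlushOnTable_spec : Claim_equal_candidateFlushOnTable := by
  intro cs _
  unfold Spec_candidateFlushOnTable candidateFlushOnTable candidateFlushOnTable_alt
  by_cases h4 : (cs.length : Int) > 4
  · rw [if_pos h4, if_pos (by exact_mod_cast h4 : cs.length > 4)]
  · rw [if_neg h4, if_neg (by omega : ¬ cs.length > 4)]
    rw [Bool.eq_iff_iff]
    exact (pvA_loop_iff cs).trans (pvB_iff cs).symm
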